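-- pv_equiv track=rewrite | github.com/Krish-Om/AI-Labs | lab2/solver_base.py | misplaced_tiles
-- ===== SOURCE A (Python) =====
-- def misplaced_tiles(board, board_size):
--     """Calculate number of misplaced tiles heuristic"""
--     misplaced = 0
--     for i in range(board_size):
--         for j in range(board_size):
--             if board[i][j] != 0:
--                 expected_value = i * board_size + j + 1
--                 if i == board_size - 1 and j == board_size - 1:
--                     expected_value = 0
--                 if board[i][j] != expected_value:
--                     misplaced += 1
--     return misplaced
-- ===== SOURCE B (Python) =====
-- def misplaced_tiles(board, board_size):
--     """Calculate number of misplaced tiles heuristic"""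
--     n = board_size
--     if n <= 0:
--         return 0
--     # inclusion-exclusion: misplaced = (nonzero tiles) - (correctly placed tiles).
--     # A nonzero tile v is correctly placed iff the cell at v's goal position
--     # (row (v-1)//n, column (v-1)%n) holds v; the blank never counts.
--     nonzero = sum(1 for i in range(n) for j in range(n) if board[i][j] != 0)
--     placed = sum(1 for v in range(1, n * n) if board[(v - 1) // n][(v - 1) % n] == v)
--     return nonzero - placed
-- ===== Notes on version B (the rewrite author's own statement) =====
-- stated objective: alternative
-- what changed: Computes the count by inclusion-exclusion as (number of nonzero tiles) minus (number of correctly placed tiles), where the second pass iterates over the goal VALUES 1..n*n-1 and looks up each value's goal cell by divmod, instead of A's single nested cell loop with inline expected-value arithmetic and a bottom-right corner branch.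
import Mathlib
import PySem

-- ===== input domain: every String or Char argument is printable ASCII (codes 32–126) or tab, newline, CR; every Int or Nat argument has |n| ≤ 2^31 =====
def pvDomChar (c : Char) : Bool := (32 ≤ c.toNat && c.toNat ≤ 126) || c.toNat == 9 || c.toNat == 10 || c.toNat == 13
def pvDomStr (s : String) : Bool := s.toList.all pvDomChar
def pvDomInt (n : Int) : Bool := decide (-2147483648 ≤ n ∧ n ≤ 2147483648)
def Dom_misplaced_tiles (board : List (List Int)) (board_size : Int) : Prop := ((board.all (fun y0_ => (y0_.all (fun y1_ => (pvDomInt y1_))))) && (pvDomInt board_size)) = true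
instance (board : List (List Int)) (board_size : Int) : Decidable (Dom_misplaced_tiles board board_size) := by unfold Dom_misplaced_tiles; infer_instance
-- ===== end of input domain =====

-- B counts misplaced tiles by inclusion-exclusion — (nonzero tiles) minus (correctly placed
-- tiles), the second pass iterating over goal VALUES 1..n*n-1 and locating each value's goal
-- cell by divmod — instead of A's nested cell loop with inline expected-value arithmetic and
-- a corner branch: an alternative decomposition of the same cost.

-- ===== PORT A =====
def misplaced_tiles (board : List (List Int)) (board_size : Int) : Int :=
  (PySem.List.pyRange 0 board_size 1).foldl (fun misplaced i =>
    (PySem.List.pyRange 0 board_size 1).foldl (fun misplaced j =>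
      if PySem.List.pyGetD (PySem.List.pyGetD board i []) j 0 ≠ 0 then
        let expected_value : Int := i * board_size + j + 1
        let expected_value : Int :=
          if i = board_size - 1 ∧ j = board_size - 1 then 0 else expected_value
        if PySem.List.pyGetD (PySem.List.pyGetD board i []) j 0 ≠ expected_value then
          misplaced + 1
        else misplaced
      else misplaced) misplaced) 0

-- ===== PORT B =====
def misplaced_tiles_alt (board : List (List Int)) (board_size : Int) : Int :=
  if board_size ≤ 0 then 0 else
  let n := board_size
  let nonzero : Int :=
    ((PySem.List.pyRange 0 n 1).flatMap (fun i =>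
      (PySem.List.pyRange 0 n 1).map (fun j =>
        PySem.List.pyGetD (PySem.List.pyGetD board i []) j 0))).foldl
      (fun c v => if v ≠ 0 then c + 1 else c) 0
  let placed : Int :=
    (PySem.List.pyRange 1 (n * n) 1).foldl
      (fun c v =>
        if PySem.List.pyGetD
            (PySem.List.pyGetD board (PySem.Int.floordiv (v - 1) n) [])
            (PySem.Int.mod (v - 1) n) 0 = v
        then c + 1 else c) 0
  nonzero - placed

-- ===== PRECONDITION & SPEC =====
-- Pre_ excludes exactly the inputs on which A raises IndexError: a board with fewer than
-- board_size rows, or one of the first board_size rows shorter than board_size.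
def Pre_misplaced_tiles (board : List (List Int)) (board_size : Int) : Prop :=
  (board_size ≤ board.length) ∧
    ∀ row ∈ board.take board_size.toNat, board_size ≤ row.length
instance (board : List (List Int)) (board_size : Int) : Decidable (Pre_misplaced_tiles board board_size) := by unfold Pre_misplaced_tiles; infer_instance

def pvWitness_misplaced_tiles : List (List Int) × Int := ([[1, 2], [0, 3]], 2)

def Spec_misplaced_tiles (board : List (List Int)) (board_size : Int) (out : Int) : Prop := out = misplaced_tiles_alt board board_size
instance (board : List (List Int)) (board_size : Int) (out : Int) : Decidable (Spec_misplaced_tiles board board_size out) := by unfold Spec_misplaced_tiles; infer_instance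

-- ===== CLAIM (what is proved, stated in full; the proofs are below) =====
def Claim_equal_misplaced_tiles : Prop := ∀ (board : List (List Int)) (board_size : Int), Dom_misplaced_tiles board board_size → Pre_misplaced_tiles board board_size → Spec_misplaced_tiles board board_size (misplaced_tiles board board_size)

-- ===== LEMMAS AND PROOFS =====

-- per-cell indicator and expected value (normal form of A)
def pvInd (v e : Int) : Int := if v ≠ 0 ∧ v ≠ e then 1 else 0
def pvCell (board : List (List Int)) (i j : Nat) : Int := (board.getD i []).getD j 0
def pvExp (n i j : Nat) : Int :=
  if i = n - 1 ∧ j = n - 1 then 0 else ((i * n + j + 1 : Nat) : Int)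

-- the inclusion-exclusion identity behind B, at one cell
theorem pvInd_sub (v e : Int) :
    pvInd v e = (if v ≠ 0 then (1 : Int) else 0) - (if v = e ∧ e ≠ 0 then (1 : Int) else 0) := by
  unfold pvInd
  by_cases h0 : v = 0 <;> by_cases he : v = e <;> subst_vars <;> simp_all

-- fold of an if-increment is an initial value plus a 0/1 sum
theorem pv_foldl_ite {α : Type} (l : List α) (p : α → Prop) [DecidablePred p] (a : Int) :
    l.foldl (fun c x => if p x then c + 1 else c) a
      = a + (l.map (fun x => if p x then (1 : Int) else 0)).sum := by
  have h : (fun (c : Int) (x : α) => if p x then c + 1 else c)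
      = fun (c : Int) (x : α) => c + (if p x then (1 : Int) else 0) := by
    funext c x; split <;> simp
  rw [h, PySem.List.foldl_add]

theorem pv_sum_map_sub {α : Type} (l : List α) (f g : α → Int) :
    (l.map (fun x => f x - g x)).sum = (l.map f).sum - (l.map g).sum := by
  induction l with
  | nil => simp
  | cons a l ih => simp [ih]; ring

-- the flat goal index i*n+j is the last one iff (i,j) is the bottom-right corner
theorem pv_corner (n i j : Nat) (hi : i < n) (hj : j < n) :
    (i * n + j = n * n - 1) ↔ (i = n - 1 ∧ j = n - 1) := by
  have h2 : 1 ≤ n * n := by nlinarith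
  constructor
  · intro h
    have h' : i * n + j + 1 = n * n := by omega
    have hi' : i = n - 1 := by
      by_contra hne
      have h1 : i + 1 ≤ n - 1 := by omega
      have h3 : i + 1 + 1 ≤ n := by omega
      nlinarith
    refine ⟨hi', ?_⟩
    subst hi'
    obtain ⟨m, rfl⟩ : ∃ m, n = m + 1 := ⟨n - 1, by omega⟩
    simp only [Nat.add_sub_cancel] at h' ⊢
    nlinarith
  · rintro ⟨rfl, rfl⟩
    obtain ⟨m, rfl⟩ : ∃ m, n = m + 1 := ⟨n - 1, by omega⟩
    simp only [Nat.add_sub_cancel]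
    ring_nf
    omega

-- reindexing a map over range (a*m) as a row-by-row flatMap
theorem pv_map_range_mul {α : Type} (m : Nat) (f : Nat → α) :
    ∀ a : Nat, (List.range (a * m)).map f
      = (List.range a).flatMap (fun i => (List.range m).map (fun j => f (i * m + j)))
  | 0 => by simp
  | (a + 1) => by
    rw [List.range_succ, List.flatMap_append, ← pv_map_range_mul m f a]
    rw [show (a + 1) * m = a * m + m by ring, List.range_add, List.map_append]
    simp [List.map_map, Function.comp_def]

-- A's nested fold in normal form
theorem pvA_norm (board : List (List Int)) (n : Nat) :
    misplaced_tiles board (n : Int)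
      = ((List.range n).map (fun i =>
          ((List.range n).map (fun j => pvInd (pvCell board i j) (pvExp n i j))).sum)).sum := by
  rcases Nat.eq_zero_or_pos n with h0 | hpos
  · subst h0
    simp [misplaced_tiles]
  unfold misplaced_tiles
  rw [PySem.List.pyRange_one]
  simp only [Int.sub_zero, Int.toNat_natCast, List.foldl_map, zero_add]
  have hcell : ∀ ki kj : Nat,
      PySem.List.pyGetD (PySem.List.pyGetD board (ki : Int) []) ((kj : Nat) : Int) 0
        = pvCell board ki kj := by
    intro ki kj
    simp [PySem.List.pyGetD_natCast, pvCell]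
  trans (List.foldl (fun (m : Int) (ki : Nat) =>
      m + ((List.range n).map (fun kj => pvInd (pvCell board ki kj) (pvExp n ki kj))).sum)
      0 (List.range n))
  · apply PySem.List.foldl_congr_mem
    intro acc ki _
    trans (List.foldl (fun (m : Int) (kj : Nat) =>
        if pvCell board ki kj ≠ 0 ∧ pvCell board ki kj ≠ pvExp n ki kj then m + 1 else m)
        acc (List.range n))
    · apply PySem.List.foldl_congr_mem
      intro m kj _
      have hcond : ((ki : Int) = (n : Int) - 1 ∧ (kj : Int) = (n : Int) - 1)
          ↔ (ki = n - 1 ∧ kj = n - 1) := by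
        constructor <;> rintro ⟨ha, hb⟩ <;> exact ⟨by omega, by omega⟩
      simp only [hcell, pvExp, hcond,
        show ((ki * n + kj + 1 : Nat) : Int) = (ki : Int) * (n : Int) + (kj : Int) + 1 from by
          push_cast; ring]
      split_ifs <;> tauto
    · rw [pv_foldl_ite (List.range n)
        (fun kj => pvCell board ki kj ≠ 0 ∧ pvCell board ki kj ≠ pvExp n ki kj) acc]
      congr 1
  · rw [PySem.List.foldl_add, zero_add]

-- B's two staged counts in the same normal form
theorem pvB_norm (board : List (List Int)) (n : Nat) :
    misplaced_tiles_alt board (n : Int)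
      = ((List.range n).map (fun i =>
          ((List.range n).map (fun j => pvInd (pvCell board i j) (pvExp n i j))).sum)).sum := by
  rcases Nat.eq_zero_or_pos n with h0 | hpos
  · subst h0
    simp [misplaced_tiles_alt]
  unfold misplaced_tiles_alt
  rw [if_neg (by omega)]
  have hcell : ∀ ki kj : Nat,
      PySem.List.pyGetD (PySem.List.pyGetD board (ki : Int) []) ((kj : Nat) : Int) 0
        = pvCell board ki kj := by
    intro ki kj
    simp [PySem.List.pyGetD_natCast, pvCell]
  -- the nonzero pass
  have hnz : ((PySem.List.pyRange 0 (n : Int) 1).flatMap (fun i =>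
        (PySem.List.pyRange 0 (n : Int) 1).map (fun j =>
          PySem.List.pyGetD (PySem.List.pyGetD board i []) j 0))).foldl
        (fun c v => if v ≠ 0 then c + 1 else c) 0
      = ((List.range n).map (fun i =>
          ((List.range n).map (fun j =>
            if pvCell board i j ≠ 0 then (1 : Int) else 0)).sum)).sum := by
    have hflat : (PySem.List.pyRange 0 (n : Int) 1).flatMap (fun i =>
          (PySem.List.pyRange 0 (n : Int) 1).map (fun j =>
            PySem.List.pyGetD (PySem.List.pyGetD board i []) j 0))
        = (List.range n).flatMap (fun i => (List.range n).map (fun j => pvCell board i j)) := by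
      rw [PySem.List.pyRange_one]
      simp only [Int.sub_zero, Int.toNat_natCast, List.flatMap_map, List.map_map]
      simp [Function.comp_def, PySem.List.pyGetD_natCast, pvCell]
    rw [hflat, pv_foldl_ite _ (fun v : Int => v ≠ 0) 0, zero_add,
      List.map_flatMap, List.flatMap_def, List.sum_flatten, List.map_map]
    congr 1
    apply List.map_congr_left
    intro i _
    simp [Function.comp_def, List.map_map]
  -- the placed pass, reindexed from goal values to cells
  have hpl : (PySem.List.pyRange 1 ((n : Int) * (n : Int)) 1).foldl
        (fun c v =>
          if PySem.List.pyGetD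
              (PySem.List.pyGetD board (PySem.Int.floordiv (v - 1) (n : Int)) [])
              (PySem.Int.mod (v - 1) (n : Int)) 0 = v
          then c + 1 else c) 0
      = ((List.range n).map (fun i =>
          ((List.range n).map (fun j =>
            if pvCell board i j = pvExp n i j ∧ pvExp n i j ≠ 0 then (1 : Int) else 0)).sum)).sum := by
    have htn : ((n : Int) * (n : Int) - 1).toNat = n * n - 1 := by
      rw [show ((n : Int) * (n : Int)) = ((n * n : Nat) : Int) by push_cast; ring]
      omega
    have hpr : PySem.List.pyRange 1 ((n : Int) * (n : Int)) 1
        = (List.range (n * n - 1)).map (fun k : Nat => (1 : Int) + k) := by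
      rw [PySem.List.pyRange_one, htn]
    rw [hpr,
      pv_foldl_ite _ (fun v : Int =>
        PySem.List.pyGetD
            (PySem.List.pyGetD board (PySem.Int.floordiv (v - 1) (n : Int)) [])
            (PySem.Int.mod (v - 1) (n : Int)) 0 = v) 0, zero_add, List.map_map]
    have hstep : ∀ k : Nat,
        (if PySem.List.pyGetD
              (PySem.List.pyGetD board (PySem.Int.floordiv ((1 : Int) + k - 1) (n : Int)) [])
              (PySem.Int.mod ((1 : Int) + k - 1) (n : Int)) 0 = (1 : Int) + k
          then (1 : Int) else 0)
        = (if pvCell board (k / n) (k % n) = (k : Int) + 1 then (1 : Int) else 0) := by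
      intro k
      have e1 : (1 : Int) + (k : Int) - 1 = ((k : Nat) : Int) := by ring
      rw [e1, PySem.Int.floordiv_natCast, PySem.Int.mod_natCast, hcell]
      have : (1 : Int) + (k : Int) = (k : Int) + 1 := by ring
      rw [this]
    simp only [Function.comp_def]
    simp only [hstep]
    -- total over all n*n goal indices, with the last one contributing 0
    have hsplit : ∀ m : Nat, ((List.range (m + 1)).map (fun k : Nat =>
          if k = m then (0 : Int)
          else if pvCell board (k / n) (k % n) = (k : Int) + 1 then 1 else 0)).sum
        = ((List.range m).map (fun k : Nat =>
            if pvCell board (k / n) (k % n) = (k : Int) + 1 then (1 : Int) else 0)).sum := by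
      intro m
      rw [List.range_succ, List.map_append, List.sum_append]
      simp only [List.map_cons, List.map_nil, List.sum_cons, List.sum_nil, if_true, add_zero]
      congr 1
      apply List.map_congr_left
      intro k hk
      have hk' : k < m := List.mem_range.mp hk
      rw [if_neg (by omega)]
    rw [← hsplit (n * n - 1),
      show (n * n - 1) + 1 = n * n from by have := Nat.mul_pos hpos hpos; omega,
      pv_map_range_mul n _ n]
    rw [List.flatMap_def, List.sum_flatten, List.map_map]
    congr 1
    apply List.map_congr_left
    intro i hi
    have hi' : i < n := List.mem_range.mp hi
    simp only [Function.comp_apply]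
    congr 1
    apply List.map_congr_left
    intro j hj
    have hj' : j < n := List.mem_range.mp hj
    have hdiv : (i * n + j) / n = i := by
      rw [Nat.mul_comm, Nat.mul_add_div hpos, Nat.div_eq_of_lt hj']
      omega
    have hmod : (i * n + j) % n = j := by
      rw [Nat.mul_comm, Nat.mul_add_mod]
      exact Nat.mod_eq_of_lt hj'
    rw [hdiv, hmod]
    by_cases hc : i = n - 1 ∧ j = n - 1
    · rw [if_pos ((pv_corner n i j hi' hj').mpr hc), pvExp, if_pos hc]
      simp
    · rw [if_neg (fun h => hc ((pv_corner n i j hi' hj').mp h)), pvExp, if_neg hc]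
      have hne : ((i : Int) * n + j + 1 : Int) ≠ 0 := by positivity
      have hcast : ((i * n + j : Nat) : Int) + 1 = ((i : Int) * n + j + 1 : Int) := by
        push_cast; ring
      rw [hcast]
      simp [hne]
  -- assemble: misplaced = nonzero - placed, cellwise by pvInd_sub
  simp only [hnz, hpl]
  simp only [pvInd_sub]
  rw [← pv_sum_map_sub]
  congr 1
  apply List.map_congr_left
  intro i _
  rw [← pv_sum_map_sub]

-- ===== VERDICT (by name: the statement is the Claim_ definition above) =====
theorem misplaced_tiles_spec : Claim_equal_misplaced_tiles := by
  intro board board_size _ _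
  unfold Spec_misplaced_tiles
  by_cases h0 : 0 ≤ board_size
  · obtain ⟨n, rfl⟩ : ∃ n : Nat, board_size = (n : Int) :=
      ⟨board_size.toNat, (Int.toNat_of_nonneg h0).symm⟩
    rw [pvA_norm board n, pvB_norm board n]
  · have h1 : PySem.List.pyRange 0 board_size 1 = [] :=
      PySem.List.pyRange_one_eq_nil (by omega)
    have h2 : board_size ≤ 0 := by omega
    simp [misplaced_tiles, misplaced_tiles_alt, h1, h2]
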